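-- pv_equiv track=rewrite | github.com/sorindragan/rpa-league-2019 | plot_line.py | get_features_framework
-- ===== SOURCE A (Python) =====
-- def get_features_framework(text):
--     words = text.split()
--     words = [word.replace('(', '') for word in words]
--     words = [word.replace(')', '') for word in words]
--     words = [word.lower() for word in words]
--
--     features = [0, 0, 0, 0, 0, 0]
--     for word in words:
--         if 'angular' in word:
--             features[0] = 1
--         if 'react' in word:
--             features[1] = 1
--         if 'node' in word:
--             features[2] = 1
--         if 'vue' in word:
--             features[3] = 1
--         if 'meteor' in word:
--             features[4] = 1
--         if 'polymer' in word:
--             features[5] = 1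
--
--     return features
-- ===== SOURCE B (Python) =====
-- def get_features_framework(text):
--     t = text.lower().replace('(', '').replace(')', '')
--     return [int('angular' in t),
--             int('react' in t),
--             int('node' in t),
--             int('vue' in t),
--             int('meteor' in t),
--             int('polymer' in t)]
-- ===== Notes on version B (the rewrite author's own statement) =====
-- stated objective: simpler
-- what changed: Replaces the split-into-words pipeline (three per-word cleaning passes plus a flag-setting loop over words) by one cleaning of the whole text and six direct substring tests; equivalent because no keyword contains whitespace.
import Mathlib
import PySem

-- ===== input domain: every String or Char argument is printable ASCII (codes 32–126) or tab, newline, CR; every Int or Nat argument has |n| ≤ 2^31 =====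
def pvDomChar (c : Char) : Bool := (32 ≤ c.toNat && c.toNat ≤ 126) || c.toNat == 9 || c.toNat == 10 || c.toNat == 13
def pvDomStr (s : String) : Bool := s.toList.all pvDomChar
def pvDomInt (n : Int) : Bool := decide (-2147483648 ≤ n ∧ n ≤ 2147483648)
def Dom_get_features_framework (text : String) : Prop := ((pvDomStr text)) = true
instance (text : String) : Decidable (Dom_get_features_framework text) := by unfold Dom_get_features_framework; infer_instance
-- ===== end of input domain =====

-- B cleans the whole text once (lowercase, drop parentheses) and uses six whole-text
-- substring tests instead of A's split-into-words pipeline with three per-word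
-- cleaning passes and a flag-setting loop; same return value.

-- ===== PORT A =====
def get_features_framework (text : String) : List Int :=
  let words := PySem.Str.split₀ text
  let words := words.map (fun word => PySem.Str.replace word "(" "")
  let words := words.map (fun word => PySem.Str.replace word ")" "")
  let words := words.map (fun word => PySem.Str.lower word)
  words.foldl (fun features word =>
    let features := if PySem.Str.isIn "angular" word then features.set 0 1 else features
    let features := if PySem.Str.isIn "react" word then features.set 1 1 else features
    let features := if PySem.Str.isIn "node" word then features.set 2 1 else features
    let features := if PySem.Str.isIn "vue" word then features.set 3 1 else features
    let features := if PySem.Str.isIn "meteor" word then features.set 4 1 else features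
    let features := if PySem.Str.isIn "polymer" word then features.set 5 1 else features
    features) [0, 0, 0, 0, 0, 0]

-- ===== PORT B =====
def get_features_framework_alt (text : String) : List Int :=
  let t := PySem.Str.replace (PySem.Str.replace (PySem.Str.lower text) "(" "") ")" ""
  [if PySem.Str.isIn "angular" t then (1 : Int) else 0,
   if PySem.Str.isIn "react" t then (1 : Int) else 0,
   if PySem.Str.isIn "node" t then (1 : Int) else 0,
   if PySem.Str.isIn "vue" t then (1 : Int) else 0,
   if PySem.Str.isIn "meteor" t then (1 : Int) else 0,
   if PySem.Str.isIn "polymer" t then (1 : Int) else 0]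

-- ===== PRECONDITION & SPEC =====
def Spec_get_features_framework (text : String) (out : List Int) : Prop := out = get_features_framework_alt text
instance (text : String) (out : List Int) : Decidable (Spec_get_features_framework text out) := by unfold Spec_get_features_framework; infer_instance

-- ===== CLAIM (what is proved, stated in full; the proofs are below) =====
def Claim_equal_get_features_framework : Prop := ∀ (text : String), Dom_get_features_framework text → Spec_get_features_framework text (get_features_framework text)

-- ===== LEMMAS AND PROOFS =====

-- `pvNonWs c`: c is not Python-whitespace; `pvP c`: c is not a parenthesis.
def pvNonWs (c : Char) : Bool := !PySem.Chars.isspace c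
def pvP (c : Char) : Bool := !(c == '(' || c == ')')
-- the combined per-character cleaning both programs perform (lowercase, drop parens)
def pvClean (l : List Char) : List Char := (l.map PySem.Chars.lowerChar).filter pvP

-- structural (non-accumulator) form of Python's whitespace split
def pvSplit : List Char → List (List Char)
  | [] => []
  | c :: t =>
      if PySem.Chars.isspace c then pvSplit t
      else (c :: t.takeWhile pvNonWs) :: pvSplit (t.dropWhile pvNonWs)
termination_by l => l.length
decreasing_by
  all_goals simp only [List.length_cons]
  · omega
  · exact Nat.lt_succ_of_le (List.length_dropWhile_le _ _)

theorem lowerChar_beq_paren (c d : Char) (hd : d = '(' ∨ d = ')') :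
    (PySem.Chars.lowerChar c == d) = (c == d) := by
  simp only [PySem.Chars.lowerChar, PySem.Chars.isupper]
  split
  · rename_i h
    simp only [Bool.and_eq_true, decide_eq_true_eq] at h
    have h65 : 65 ≤ c.toNat := h.1
    have h90 : c.toNat ≤ 90 := h.2
    have hv : Nat.isValidChar (c.toNat + 32) := by left; omega
    have ht : (Char.ofNat (c.toNat + 32)).toNat = c.toNat + 32 := by
      simp [Char.ofNat, hv]
    have hne1 : Char.ofNat (c.toNat + 32) ≠ d := by
      intro he; rcases hd with rfl | rfl <;> (rw [he] at ht; simp at ht; omega)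
    have hne2 : c ≠ d := by
      intro he; rcases hd with rfl | rfl <;> (subst he; simp at h65 h90)
    simp [hne1, hne2]
  · rfl

theorem pvP_lowerChar (c : Char) : pvP (PySem.Chars.lowerChar c) = pvP c := by
  simp [pvP, lowerChar_beq_paren c '(' (Or.inl rfl), lowerChar_beq_paren c ')' (Or.inr rfl)]

theorem pvP_of_isspace (c : Char) (h : PySem.Chars.isspace c = true) : pvP c = true := by
  simp only [PySem.Chars.isspace, Bool.or_eq_true, Bool.and_eq_true, decide_eq_true_eq] at h
  have h40 : c.toNat ≠ 40 := by omega
  have h41 : c.toNat ≠ 41 := by omega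
  have hc1 : c ≠ '(' := fun he => h40 (by simp [he])
  have hc2 : c ≠ ')' := fun he => h41 (by simp [he])
  simp [pvP, hc1, hc2]

theorem lowerChar_of_isspace (c : Char) (h : PySem.Chars.isspace c = true) :
    PySem.Chars.lowerChar c = c := by
  simp only [PySem.Chars.isspace, Bool.or_eq_true, Bool.and_eq_true, decide_eq_true_eq] at h
  simp only [PySem.Chars.lowerChar, PySem.Chars.isupper]
  split
  · rename_i hu
    simp only [Bool.and_eq_true, decide_eq_true_eq] at hu
    have h65 : 65 ≤ c.toNat := hu.1
    have h90 : c.toNat ≤ 90 := hu.2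
    exact absurd h (by omega)
  · rfl

-- cleaning a string that starts with whitespace keeps that first character
theorem pvClean_cons_ws (c : Char) (t : List Char) (h : PySem.Chars.isspace c = true) :
    pvClean (c :: t) = c :: pvClean t := by
  simp [pvClean, lowerChar_of_isspace c h, pvP_of_isspace c h]

theorem pvClean_append (u v : List Char) : pvClean (u ++ v) = pvClean u ++ pvClean v := by
  simp [pvClean]

-- A's replace(c, '') is character filtering
theorem replace_go_filter (c : Char) :
    ∀ (fuel : Nat) (l acc : List Char), l.length ≤ fuel →
      PySem.Chars.replace.go [c] [] fuel l acc = acc.reverse ++ l.filter (fun x => !(x == c)) := by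
  intro fuel
  induction fuel with
  | zero =>
    intro l acc h
    have : l = [] := List.eq_nil_of_length_eq_zero (Nat.le_zero.mp h)
    subst this
    simp [PySem.Chars.replace.go]
  | succ n ih =>
    intro l acc h
    cases l with
    | nil => simp [PySem.Chars.replace.go]
    | cons d t =>
      rw [PySem.Chars.replace.go]
      have hpre : [c].isPrefixOf (d :: t) = (c == d) := by
        simp [List.isPrefixOf]
      rw [hpre]
      by_cases hcd : c = d
      · subst hcd
        simp only [BEq.rfl, if_true, List.length_cons, List.length_nil, List.drop_succ_cons,
          List.drop_zero, List.reverse_nil, List.nil_append]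
        rw [ih t acc (by simpa using Nat.le_of_succ_le_succ h)]
        simp
      · have hb : (c == d) = false := beq_eq_false_iff_ne.mpr hcd
        simp only [hb, Bool.false_eq_true, if_false]
        rw [ih t (d :: acc) (by simpa using Nat.le_of_succ_le_succ h)]
        have hb' : (d == c) = false := beq_eq_false_iff_ne.mpr (Ne.symm hcd)
        simp [hb']

theorem replace_single_filter (l : List Char) (c : Char) :
    PySem.Chars.replace l [c] [] = l.filter (fun x => !(x == c)) := by
  simp [PySem.Chars.replace, replace_go_filter c l.length l [] le_rfl]

-- the tail-recursive Python split equals the structural pvSplit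
theorem split₀_go_eq :
    ∀ (s cur : List Char) (accl : List (List Char)),
      PySem.Chars.split₀.go s cur accl =
        accl.reverse ++ (if cur.isEmpty then pvSplit s
          else (cur.reverse ++ s.takeWhile pvNonWs) :: pvSplit (s.dropWhile pvNonWs)) := by
  intro s
  induction s with
  | nil =>
    intro cur accl
    rw [PySem.Chars.split₀.go]
    cases cur <;> simp [pvSplit]
  | cons c t ih =>
    intro cur accl
    rw [PySem.Chars.split₀.go]
    by_cases hws : PySem.Chars.isspace c = true
    · rw [if_pos hws]
      cases cur with
      | nil =>
        simp only [List.isEmpty_nil, if_true]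
        rw [ih [] accl]
        simp [pvSplit, hws]
      | cons x xs =>
        simp only [List.isEmpty_cons, Bool.false_eq_true, if_false]
        rw [ih [] ((x :: xs).reverse :: accl)]
        have htw : (c :: t).takeWhile pvNonWs = [] := by
          simp [pvNonWs, hws]
        have hdw : (c :: t).dropWhile pvNonWs = c :: t := by
          simp [pvNonWs, hws]
        simp only [List.isEmpty_nil, if_true, htw, hdw, List.reverse_cons, List.append_assoc,
          List.append_nil]
        rw [pvSplit]
        simp [hws]
    · rw [if_neg hws]
      rw [ih (c :: cur) accl]
      have hb : pvNonWs c = true := by simp [pvNonWs, hws]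
      have htw : (c :: t).takeWhile pvNonWs = c :: t.takeWhile pvNonWs := by
        simp [hb]
      have hdw : (c :: t).dropWhile pvNonWs = t.dropWhile pvNonWs := by
        simp [hb]
      simp only [List.isEmpty_cons, Bool.false_eq_true, if_false, List.reverse_cons, htw, hdw]
      cases cur with
      | nil =>
        simp only [List.isEmpty_nil, if_true, List.reverse_nil, List.nil_append]
        rw [pvSplit, if_neg hws]
        simp
      | cons x xs =>
        simp

theorem split₀_eq (l : List Char) : PySem.Chars.split₀ l = pvSplit l := by
  rw [PySem.Chars.split₀, split₀_go_eq]
  simp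

-- a whitespace-free keyword cannot start inside the whitespace that separates words
theorem infix_cons_ws (kw : List Char) (c : Char) (l : List Char) (hne : kw ≠ [])
    (hk : ∀ x ∈ kw, PySem.Chars.isspace x = false) (hc : PySem.Chars.isspace c = true) :
    (kw <:+: c :: l) ↔ kw <:+: l := by
  constructor
  · intro h
    rcases List.infix_cons_iff.mp h with hp | h
    · cases kw with
      | nil => exact absurd rfl hne
      | cons k0 ks =>
        have he : k0 = c := (List.cons_prefix_cons.mp hp).1
        have hws := hk k0 (by simp)
        rw [he, hc] at hws
        simp at hws
    · exact h
  · intro h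
    exact h.trans ⟨[c], [], by simp⟩

theorem pv_prefix_part (kw u v : List Char) (hk : ∀ c ∈ kw, PySem.Chars.isspace c = false)
    (hv : v = [] ∨ ∃ d v', v = d :: v' ∧ PySem.Chars.isspace d = true) :
    kw <+: u ++ v → kw <+: u := by
  intro h
  rcases hv with rfl | ⟨d, v', rfl, hd⟩
  · simpa using h
  · by_cases hlen : kw.length ≤ u.length
    · have he := List.prefix_iff_eq_take.mp h
      rw [List.take_append] at he
      have hz : kw.length - u.length = 0 := by omega
      rw [hz, List.take_zero, List.append_nil] at he
      rw [he]
      exact List.take_prefix _ _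
    · exfalso
      have he := List.prefix_iff_eq_take.mp h
      rw [List.take_append] at he
      have hpos : 0 < kw.length - u.length := by omega
      have hc : (d :: v').take (kw.length - u.length) = d :: v'.take (kw.length - u.length - 1) := by
        cases hn : kw.length - u.length with
        | zero => omega
        | succ m => simp [List.take_succ_cons]
      rw [hc] at he
      have hdm : d ∈ kw := by rw [he]; simp
      have h1 := hk d hdm
      rw [hd] at h1
      simp at h1

-- a keyword without whitespace cannot straddle the boundary before a whitespace character
theorem pv_straddle (kw u v : List Char) (hk : ∀ c ∈ kw, PySem.Chars.isspace c = false)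
    (hv : v = [] ∨ ∃ d v', v = d :: v' ∧ PySem.Chars.isspace d = true) :
    kw <:+: u ++ v ↔ kw <:+: u ∨ kw <:+: v := by
  constructor
  · intro h
    induction u with
    | nil => exact Or.inr (by simpa using h)
    | cons a u' ih =>
      rcases List.infix_cons_iff.mp h with hpre | hinf
      · exact Or.inl (pv_prefix_part kw (a :: u') v hk hv hpre).isInfix
      · rcases ih hinf with h1 | h2
        · exact Or.inl (h1.trans ⟨[a], [], by simp⟩)
        · exact Or.inr h2
  · intro h
    rcases h with h | h
    · exact h.trans ⟨[], v, by simp⟩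
    · exact h.trans ⟨u, [], by simp⟩

-- the central fact: a whitespace-free keyword occurs in some cleaned word
-- iff it occurs in the cleaned whole text
theorem pv_main (kw : List Char) (hne : kw ≠ [])
    (hk : ∀ c ∈ kw, PySem.Chars.isspace c = false) (t : List Char) :
    (∃ w ∈ pvSplit t, kw <:+: pvClean w) ↔ kw <:+: pvClean t := by
  induction t using pvSplit.induct with
  | case1 =>
    simp only [pvSplit, pvClean, List.map_nil, List.filter_nil]
    constructor
    · rintro ⟨w, hw, _⟩; simp at hw
    · intro h
      exact absurd (List.eq_nil_of_infix_nil h) hne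
  | case2 c t hws ih =>
    rw [pvSplit, if_pos hws, pvClean_cons_ws c t hws,
      infix_cons_ws kw c (pvClean t) hne hk hws]
    exact ih
  | case3 c t hws ih =>
    have hws' : PySem.Chars.isspace c = false := by
      cases h : PySem.Chars.isspace c
      · rfl
      · exact absurd h hws
    rw [pvSplit, if_neg hws]
    have hsplit : c :: t = (c :: t.takeWhile pvNonWs) ++ t.dropWhile pvNonWs := by
      simp [List.takeWhile_append_dropWhile]
    rw [show pvClean (c :: t) = pvClean (c :: t.takeWhile pvNonWs) ++ pvClean (t.dropWhile pvNonWs) by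
      rw [← pvClean_append, ← hsplit]]
    have hv : pvClean (t.dropWhile pvNonWs) = [] ∨
        ∃ d v', pvClean (t.dropWhile pvNonWs) = d :: v' ∧ PySem.Chars.isspace d = true := by
      cases hr : t.dropWhile pvNonWs with
      | nil => left; simp [pvClean]
      | cons d r' =>
        right
        have hd : PySem.Chars.isspace d = true := by
          have h2 := List.head_dropWhile_not pvNonWs (l := t) (by rw [hr]; simp)
          simp only [hr] at h2
          simpa [pvNonWs] using h2
        exact ⟨d, pvClean r', by exact pvClean_cons_ws d r' hd, hd⟩
    rw [pv_straddle kw _ _ hk hv]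
    constructor
    · rintro ⟨w, hw, hinf⟩
      rcases List.mem_cons.mp hw with rfl | hw
      · exact Or.inl hinf
      · exact Or.inr (ih.mp ⟨w, hw, hinf⟩)
    · rintro (h | h)
      · exact ⟨_, by simp, h⟩
      · obtain ⟨w, hw, hinf⟩ := ih.mpr h
        exact ⟨w, by simp [hw], hinf⟩

-- evaluating A's flag-setting loop: each flag records whether any word contains its keyword
theorem fold_spec (ws : List String) :
    ∀ a0 a1 a2 a3 a4 a5 : Int,
      ws.foldl (fun features word =>
        let features := if PySem.Str.isIn "angular" word then features.set 0 1 else features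
        let features := if PySem.Str.isIn "react" word then features.set 1 1 else features
        let features := if PySem.Str.isIn "node" word then features.set 2 1 else features
        let features := if PySem.Str.isIn "vue" word then features.set 3 1 else features
        let features := if PySem.Str.isIn "meteor" word then features.set 4 1 else features
        let features := if PySem.Str.isIn "polymer" word then features.set 5 1 else features
        features) [a0, a1, a2, a3, a4, a5] =
      [if ws.any (fun w => PySem.Str.isIn "angular" w) then 1 else a0,
       if ws.any (fun w => PySem.Str.isIn "react" w) then 1 else a1,
       if ws.any (fun w => PySem.Str.isIn "node" w) then 1 else a2,
       if ws.any (fun w => PySem.Str.isIn "vue" w) then 1 else a3,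
       if ws.any (fun w => PySem.Str.isIn "meteor" w) then 1 else a4,
       if ws.any (fun w => PySem.Str.isIn "polymer" w) then 1 else a5] := by
  induction ws with
  | nil => intro a0 a1 a2 a3 a4 a5; simp
  | cons w ws ih =>
    intro a0 a1 a2 a3 a4 a5
    rw [List.foldl_cons]
    have hstep :
        (fun (features : List Int) (word : String) =>
          let features := if PySem.Str.isIn "angular" word then features.set 0 1 else features
          let features := if PySem.Str.isIn "react" word then features.set 1 1 else features
          let features := if PySem.Str.isIn "node" word then features.set 2 1 else features
          let features := if PySem.Str.isIn "vue" word then features.set 3 1 else features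
          let features := if PySem.Str.isIn "meteor" word then features.set 4 1 else features
          let features := if PySem.Str.isIn "polymer" word then features.set 5 1 else features
          features) [a0, a1, a2, a3, a4, a5] w =
        [if PySem.Str.isIn "angular" w then 1 else a0,
         if PySem.Str.isIn "react" w then 1 else a1,
         if PySem.Str.isIn "node" w then 1 else a2,
         if PySem.Str.isIn "vue" w then 1 else a3,
         if PySem.Str.isIn "meteor" w then 1 else a4,
         if PySem.Str.isIn "polymer" w then 1 else a5] := by
      simp only
      split_ifs <;> rfl
    simp only [hstep]
    rw [ih]
    clear ih hstep
    simp only [List.any_cons, List.cons.injEq]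
    and_intros <;> first
      | trivial
      | (split_ifs <;> simp_all only [Bool.or_eq_true, Bool.not_eq_true, Bool.false_eq_true,
           or_self, or_false, or_true] <;> first | rfl | tauto)

-- cleaning as A performs it per word equals pvClean
theorem clean_word (l : List Char) :
    ((l.filter (fun x => !(x == '('))).filter (fun x => !(x == ')'))).map PySem.Chars.lowerChar
      = pvClean l := by
  rw [List.filter_filter]
  have h1 : pvClean l = (l.filter pvP).map PySem.Chars.lowerChar := by
    rw [pvClean, List.filter_map]
    congr 1
    apply List.filter_congr
    intro c _
    exact pvP_lowerChar c
  rw [h1]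
  congr 1
  apply List.filter_congr
  intro c _
  simp [pvP, Bool.and_comm]

-- cleaning as B performs it on the whole text equals pvClean
theorem clean_text (l : List Char) :
    (((l.map PySem.Chars.lowerChar).filter (fun x => !(x == '('))).filter (fun x => !(x == ')')))
      = pvClean l := by
  rw [List.filter_filter, pvClean]
  apply List.filter_congr
  intro c _
  simp [pvP, Bool.and_comm]

-- the whole-string membership test equals the any-word membership test, per keyword
theorem any_eq (text : String) (k : String) (hne : k.toList ≠ [])
    (hk : ∀ c ∈ k.toList, PySem.Chars.isspace c = false) :
    ((((PySem.Str.split₀ text).map (fun w => PySem.Str.replace w "(" "")).map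
        (fun w => PySem.Str.replace w ")" "")).map (fun w => PySem.Str.lower w)).any
      (fun w => PySem.Str.isIn k w)
    = PySem.Str.isIn k (PySem.Str.replace (PySem.Str.replace (PySem.Str.lower text) "(" "") ")" "") := by
  rw [Bool.eq_iff_iff]
  simp only [List.any_map, List.any_eq_true, Function.comp]
  have htoL : ∀ (w : String),
      (PySem.Str.lower (PySem.Str.replace (PySem.Str.replace w "(" "") ")" "")).toList
        = pvClean w.toList := by
    intro w
    simp only [PySem.Str.lower, PySem.Str.replace, String.toList_ofList]
    rw [show ("(" : String).toList = ['('] from rfl, show (")" : String).toList = [')'] from rfl,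
      show ("" : String).toList = [] from rfl]
    rw [replace_single_filter, replace_single_filter, PySem.Chars.lower, clean_word]
  have htoR :
      (PySem.Str.replace (PySem.Str.replace (PySem.Str.lower text) "(" "") ")" "").toList
        = pvClean text.toList := by
    simp only [PySem.Str.lower, PySem.Str.replace, String.toList_ofList]
    rw [show ("(" : String).toList = ['('] from rfl, show (")" : String).toList = [')'] from rfl,
      show ("" : String).toList = [] from rfl]
    rw [replace_single_filter, replace_single_filter, PySem.Chars.lower, clean_text]
  constructor
  · rintro ⟨w, hw, hin⟩
    rw [PySem.Str.isIn, htoL w, PySem.Chars.isIn_iff_infix] at hin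
    rw [PySem.Str.isIn, htoR, PySem.Chars.isIn_iff_infix]
    rw [PySem.Str.split₀, split₀_eq] at hw
    obtain ⟨wl, hwl, rfl⟩ := List.mem_map.mp hw
    rw [String.toList_ofList] at hin
    exact (pv_main k.toList hne hk text.toList).mp ⟨wl, hwl, hin⟩
  · intro hin
    rw [PySem.Str.isIn, htoR, PySem.Chars.isIn_iff_infix] at hin
    obtain ⟨wl, hwl, hinf⟩ := (pv_main k.toList hne hk text.toList).mpr hin
    refine ⟨String.ofList wl, ?_, ?_⟩
    · rw [PySem.Str.split₀, split₀_eq]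
      exact List.mem_map.mpr ⟨wl, hwl, rfl⟩
    · rw [PySem.Str.isIn, htoL, PySem.Chars.isIn_iff_infix, String.toList_ofList]
      exact hinf

-- ===== VERDICT (by name: the statement is the Claim_ definition above) =====
-- supplies the per-keyword side conditions of any_eq from a boolean evaluation
theorem hk_of_all (k : String) (h : k.toList.all (fun c => !PySem.Chars.isspace c) = true) :
    ∀ c ∈ k.toList, PySem.Chars.isspace c = false := by
  intro c hc
  have h2 := List.all_eq_true.mp h c hc
  simpa using h2

theorem get_features_framework_spec : Claim_equal_get_features_framework := by
  intro text _
  show get_features_framework text = get_features_framework_alt text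
  have hA : get_features_framework text =
      ((((PySem.Str.split₀ text).map (fun w => PySem.Str.replace w "(" "")).map
          (fun w => PySem.Str.replace w ")" "")).map (fun w => PySem.Str.lower w)).foldl
        (fun features word =>
          let features := if PySem.Str.isIn "angular" word then features.set 0 1 else features
          let features := if PySem.Str.isIn "react" word then features.set 1 1 else features
          let features := if PySem.Str.isIn "node" word then features.set 2 1 else features
          let features := if PySem.Str.isIn "vue" word then features.set 3 1 else features
          let features := if PySem.Str.isIn "meteor" word then features.set 4 1 else features
          let features := if PySem.Str.isIn "polymer" word then features.set 5 1 else features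
          features) [0, 0, 0, 0, 0, 0] := rfl
  rw [hA, fold_spec]
  rw [any_eq text "angular" (by simp) (hk_of_all _ (by rfl)),
    any_eq text "react" (by simp) (hk_of_all _ (by rfl)),
    any_eq text "node" (by simp) (hk_of_all _ (by rfl)),
    any_eq text "vue" (by simp) (hk_of_all _ (by rfl)),
    any_eq text "meteor" (by simp) (hk_of_all _ (by rfl)),
    any_eq text "polymer" (by simp) (hk_of_all _ (by rfl))]
  rfl
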